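-- pv_equiv track=rewrite | github.com/aliamiryan99/Cyrus | AlgorithmFactory/AlgorithmTools/LocalExtermums.py | remove_continuous_extremum
-- ===== SOURCE A (Python) =====
-- def remove_continuous_extremum(local_min, local_max):
--     i, j = 0, 0
--     flag = 0
--     new_local_min, new_local_max = [], []
--     while True:
--         if j != len(local_min) and (i == len(local_max) or local_min[j] < local_max[i]):
--             if flag != 1:
--                 new_local_min.append(local_min[j])
--             flag = 1
--             j += 1
--         else:
--             if i == len(local_max):
--                 break
--             if flag != -1:
--                 new_local_max.append(local_max[i])
--             flag = -1
--             i += 1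
--     return new_local_min, new_local_max
-- ===== SOURCE B (Python) =====
-- def remove_continuous_extremum(local_min, local_max):
--     # Pass 1: two-pointer merge into one ordered stream of labelled events
--     # (True = min event, False = max event; max wins on equal values).
--     events = []
--     i, j = 0, 0
--     while j < len(local_min) or i < len(local_max):
--         if j < len(local_min) and (i == len(local_max) or local_min[j] < local_max[i]):
--             events.append((True, local_min[j]))
--             j += 1
--         else:
--             events.append((False, local_max[i]))
--             i += 1
--     # Pass 2: collapse each run of consecutive same-label events to its first value.
--     new_local_min, new_local_max = [], []
--     prev = None
--     for lab, v in events: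
--         if lab != prev:
--             (new_local_min if lab else new_local_max).append(v)
--         prev = lab
--     return new_local_min, new_local_max
-- ===== Notes on version B (the rewrite author's own statement) =====
-- stated objective: alternative
-- what changed: A's single fused loop that merges and filters with a flag is split into two passes: a two-pointer merge emitting a labelled (min/max) event stream, then a separate pass collapsing each run of consecutive same-label events to its first value.
import Mathlib
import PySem

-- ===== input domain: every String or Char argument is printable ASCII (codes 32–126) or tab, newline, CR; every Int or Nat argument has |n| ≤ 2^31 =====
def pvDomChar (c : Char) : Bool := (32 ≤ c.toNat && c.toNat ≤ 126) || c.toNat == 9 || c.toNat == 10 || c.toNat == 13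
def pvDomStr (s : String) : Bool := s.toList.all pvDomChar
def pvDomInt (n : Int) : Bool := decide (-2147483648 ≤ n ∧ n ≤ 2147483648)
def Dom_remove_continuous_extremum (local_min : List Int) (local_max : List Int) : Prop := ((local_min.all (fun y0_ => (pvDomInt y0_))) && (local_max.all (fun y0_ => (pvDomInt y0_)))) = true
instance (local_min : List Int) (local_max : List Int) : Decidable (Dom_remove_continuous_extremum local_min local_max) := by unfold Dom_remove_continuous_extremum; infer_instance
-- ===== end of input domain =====

-- B splits A's fused merge-and-filter loop into a labelled-event merge plus a separate
-- run-collapsing pass (alternative decomposition, same O(n+m) cost).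


-- ===== PORT A =====
-- A's while-loop over indices i, j with the running flag and the two output accumulators.
-- Python's `j != len(local_min)` / `i == len(local_max)` are written as `j < …` / `… ≤ i`:
-- both counters start at 0 and only ever grow by 1, so the tests coincide on every
-- reachable state (the `<`/`≤` form is what makes the recursion's measure decrease).
-- Indices are always in range when read (the guards ensure it), so `getD … 0` is exact.
def removeLoop (local_min local_max : List Int) (i j : Nat) (flag : Int)
    (new_local_min new_local_max : List Int) : List Int × List Int :=
  if _h1 : j < local_min.length ∧ (i = local_max.length ∨ local_min.getD j 0 < local_max.getD i 0) then
    removeLoop local_min local_max i (j + 1) 1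
      (if flag ≠ 1 then new_local_min ++ [local_min.getD j 0] else new_local_min) new_local_max
  else if _h2 : local_max.length ≤ i then
    (new_local_min, new_local_max)
  else
    removeLoop local_min local_max (i + 1) j (-1)
      new_local_min (if flag ≠ -1 then new_local_max ++ [local_max.getD i 0] else new_local_max)
termination_by (local_min.length - j) + (local_max.length - i)
decreasing_by
  · omega
  · omega

def remove_continuous_extremum (local_min : List Int) (local_max : List Int) : List Int × List Int :=
  removeLoop local_min local_max 0 0 0 [] []

-- ===== PORT B =====
-- Pass 1 of Source B: the two-pointer merge producing labelled events (true = min, false = max),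
-- written as the structural recursion on the two unread suffixes.
def mergeEvents : List Int → List Int → List (Bool × Int)
  | [], maxs => maxs.map (fun b => (false, b))
  | a :: mins, [] => (true, a) :: mergeEvents mins []
  | a :: mins, b :: maxs =>
    if a < b then (true, a) :: mergeEvents mins (b :: maxs)
    else (false, b) :: mergeEvents (a :: mins) maxs

-- Pass 2 of Source B: keep the first value of each run of consecutive same-label events,
-- routing kept values to the min/max list by their label; `prev` is the previous label.
def collapseRuns : Option Bool → List (Bool × Int) → List Int × List Int
  | _, [] => ([], [])
  | prev, (lab, v) :: rest =>
    let r := collapseRuns (some lab) rest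
    if prev = some lab then r
    else if lab then (v :: r.1, r.2) else (r.1, v :: r.2)

def remove_continuous_extremum_alt (local_min : List Int) (local_max : List Int) : List Int × List Int :=
  collapseRuns none (mergeEvents local_min local_max)

-- ===== PRECONDITION & SPEC =====
def Spec_remove_continuous_extremum (local_min : List Int) (local_max : List Int) (out : List Int × List Int) : Prop := out = remove_continuous_extremum_alt local_min local_max
instance (local_min : List Int) (local_max : List Int) (out : List Int × List Int) : Decidable (Spec_remove_continuous_extremum local_min local_max out) := by unfold Spec_remove_continuous_extremum; infer_instance

-- ===== CLAIM (what is proved, stated in full; the proofs are below) =====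
def Claim_equal_remove_continuous_extremum : Prop := ∀ (local_min : List Int) (local_max : List Int), Dom_remove_continuous_extremum local_min local_max → Spec_remove_continuous_extremum local_min local_max (remove_continuous_extremum local_min local_max)

-- ===== LEMMAS AND PROOFS =====

-- A's flag as B's previous-label state: 1 ↦ just-saw-min, -1 ↦ just-saw-max, other ↦ none.
def flagPrev (flag : Int) : Option Bool :=
  if flag = 1 then some true else if flag = -1 then some false else none

theorem mergeEvents_nil_left (maxs : List Int) :
    mergeEvents [] maxs = maxs.map (fun b => (false, b)) := by
  cases maxs <;> simp [mergeEvents]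

theorem removeLoop_eq (local_min local_max : List Int) :
    ∀ i j (flag : Int) nmin nmax, i ≤ local_max.length → j ≤ local_min.length →
    removeLoop local_min local_max i j flag nmin nmax =
      (nmin ++ (collapseRuns (flagPrev flag) (mergeEvents (local_min.drop j) (local_max.drop i))).1,
       nmax ++ (collapseRuns (flagPrev flag) (mergeEvents (local_min.drop j) (local_max.drop i))).2) := by
  intro i j flag nmin nmax hi hj
  fun_induction removeLoop local_min local_max i j flag nmin nmax with
  | case1 i j flag nmin nmax h1 ih =>
    have hjlt : j < local_min.length := h1.1
    have hdropj : local_min.drop j = local_min.getD j 0 :: local_min.drop (j + 1) := by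
      rw [List.getD_eq_getElem _ _ hjlt, List.drop_eq_getElem_cons hjlt]
    have hmerge : mergeEvents (local_min.drop j) (local_max.drop i)
        = (true, local_min.getD j 0) :: mergeEvents (local_min.drop (j + 1)) (local_max.drop i) := by
      by_cases him : i = local_max.length
      · rw [hdropj, him, List.drop_length]
        simp [mergeEvents]
      · have hilt : i < local_max.length := by omega
        have hcase : local_min.getD j 0 < local_max.getD i 0 := h1.2.resolve_left him
        have hdropi : local_max.drop i = local_max.getD i 0 :: local_max.drop (i + 1) := by
          rw [List.getD_eq_getElem _ _ hilt, List.drop_eq_getElem_cons hilt]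
        rw [hdropj, hdropi, mergeEvents, if_pos hcase, ← hdropi]
    have ih' := ih hi (by omega)
    simp only [dite_eq_ite] at ih'
    rw [hmerge, ih']
    simp only [collapseRuns, flagPrev]
    by_cases hf : flag = 1
    · simp [hf]
    · simp [hf, List.append_assoc]
  | case2 i j flag nmin nmax h1 h2 =>
    have hjn : j = local_min.length := by
      by_contra hne
      exact h1 ⟨by omega, Or.inl (by omega)⟩
    have hin : i = local_max.length := by omega
    rw [hjn, hin, List.drop_length, List.drop_length]
    simp [mergeEvents, collapseRuns]
  | case3 i j flag nmin nmax h1 h2 ih =>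
    have hilt : i < local_max.length := by omega
    have hdropi : local_max.drop i = local_max.getD i 0 :: local_max.drop (i + 1) := by
      rw [List.getD_eq_getElem _ _ hilt, List.drop_eq_getElem_cons hilt]
    have hmerge : mergeEvents (local_min.drop j) (local_max.drop i)
        = (false, local_max.getD i 0) :: mergeEvents (local_min.drop j) (local_max.drop (i + 1)) := by
      by_cases hjn : j < local_min.length
      · have hnlt : ¬ local_min.getD j 0 < local_max.getD i 0 := fun hlt => h1 ⟨hjn, Or.inr hlt⟩
        have hdropj : local_min.drop j = local_min.getD j 0 :: local_min.drop (j + 1) := by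
          rw [List.getD_eq_getElem _ _ hjn, List.drop_eq_getElem_cons hjn]
        rw [hdropj, hdropi, mergeEvents, if_neg hnlt, ← hdropj]
      · have hje : j = local_min.length := by omega
        rw [hje, List.drop_length, hdropi, mergeEvents_nil_left, mergeEvents_nil_left, List.map_cons]
    have ih' := ih (by omega) hj
    simp only [dite_eq_ite] at ih'
    rw [hmerge, ih']
    simp only [collapseRuns, flagPrev]
    by_cases hf : flag = -1
    · simp [hf]
    · simp [hf, List.append_assoc]

-- ===== VERDICT (by name: the statement is the Claim_ definition above) =====
theorem remove_continuous_extremum_spec : Claim_equal_remove_continuous_extremum := by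
  intro local_min local_max _
  unfold Spec_remove_continuous_extremum remove_continuous_extremum remove_continuous_extremum_alt
  rw [removeLoop_eq local_min local_max 0 0 0 [] [] (by omega) (by omega)]
  simp [flagPrev]
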